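-- pv_equiv track=rewrite | github.com/TreyMangat/ai_slack_extension | orchestrator/app/slackbot.py | _extract_file_links
-- ===== SOURCE A (Python) =====
-- from typing import Any
--
-- def _dedupe(values: list[str]) -> list[str]:
--     seen: set[str] = set()
--     output: list[str] = []
--     for raw in values:
--         item = str(raw).strip()
--         if not item:
--             continue
--         key = item.lower()
--         if key in seen:
--             continue
--         seen.add(key)
--         output.append(item)
--     return output
--
-- def _extract_file_links(event: dict[str, Any]) -> list[str]:
--     links: list[str] = []
--     for item in event.get("files") or []:
--         if not isinstance(item, dict):
--             continue
--         permalink = str(item.get("permalink") or "").strip()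
--         if permalink:
--             links.append(permalink)
--     return _dedupe(links)
-- ===== SOURCE B (Python) =====
-- from typing import Any
--
-- def _extract_file_links(event: dict[str, Any]) -> list[str]:
--     seen: set[str] = set()
--     links: list[str] = []
--     for item in event.get("files") or []:
--         if not isinstance(item, dict):
--             continue
--         permalink = str(item.get("permalink") or "").strip()
--         if not permalink:
--             continue
--         key = permalink.lower()
--         if key in seen:
--             continue
--         seen.add(key)
--         links.append(permalink)
--     return links
-- ===== Notes on version B (the rewrite author's own statement) =====
-- stated objective: simpler
-- what changed: Fuses A's two passes (collect permalinks, then a separate case-insensitive dedupe helper that re-strips every entry) into one loop over the files that maintains the seen-set inline, with no helper and no intermediate list.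
import Mathlib
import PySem

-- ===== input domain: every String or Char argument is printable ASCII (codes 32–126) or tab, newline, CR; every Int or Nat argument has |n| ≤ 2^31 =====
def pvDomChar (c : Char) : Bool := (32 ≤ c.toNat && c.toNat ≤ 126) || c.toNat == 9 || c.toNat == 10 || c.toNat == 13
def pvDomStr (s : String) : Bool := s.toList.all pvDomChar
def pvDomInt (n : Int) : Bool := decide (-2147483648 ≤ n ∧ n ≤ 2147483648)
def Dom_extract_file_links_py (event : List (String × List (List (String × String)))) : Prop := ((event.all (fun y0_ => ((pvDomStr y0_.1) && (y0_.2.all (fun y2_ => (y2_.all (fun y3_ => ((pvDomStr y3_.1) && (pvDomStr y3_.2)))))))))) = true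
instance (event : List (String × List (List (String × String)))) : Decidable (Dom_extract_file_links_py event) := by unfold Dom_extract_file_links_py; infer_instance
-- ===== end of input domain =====

-- B fuses A's extract-then-dedupe two-pass structure (with its _dedupe helper) into a
-- single loop maintaining the seen-set inline; same result, no helper, no intermediate list.

-- ===== PORT A =====
-- step of A's _dedupe loop (state = (seen, output))
def pyDedupeStep (st : PySem.Set String × List String) (raw : String) :
    PySem.Set String × List String :=
  let item := PySem.Str.strip raw        -- item = str(raw).strip(); str() is identity on str
  if item = "" then st
  else
    let key := PySem.Str.lower item
    if PySem.Set.contains st.1 key then st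
    else (PySem.Set.add st.1 key, st.2 ++ [item])

-- A's _dedupe helper
def pyDedupe (values : List String) : List String :=
  (values.foldl pyDedupeStep (PySem.Set.empty, [])).2

-- step of A's collection loop over files (isinstance(item, dict) always holds in this typing)
def pyExtractStep (acc : List String) (item : List (String × String)) : List String :=
  let permalink := PySem.Str.strip ((PySem.Dict.get? (PySem.Dict.mk item) "permalink").getD "")
  if permalink = "" then acc else acc ++ [permalink]

def extract_file_links_py (event : List (String × List (List (String × String)))) : List String :=
  let files := (PySem.Dict.get? (PySem.Dict.mk event) "files").getD []   -- event.get("files") or []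
  let links := files.foldl pyExtractStep []
  pyDedupe links

-- ===== PORT B =====
-- B's single fused loop step (state = (seen, links))
def pyFusedStep (st : PySem.Set String × List String) (item : List (String × String)) :
    PySem.Set String × List String :=
  let permalink := PySem.Str.strip ((PySem.Dict.get? (PySem.Dict.mk item) "permalink").getD "")
  if permalink = "" then st
  else
    let key := PySem.Str.lower permalink
    if PySem.Set.contains st.1 key then st
    else (PySem.Set.add st.1 key, st.2 ++ [permalink])

def extract_file_links_py_alt (event : List (String × List (List (String × String)))) : List String :=
  let files := (PySem.Dict.get? (PySem.Dict.mk event) "files").getD []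
  (files.foldl pyFusedStep (PySem.Set.empty, [])).2

-- ===== PRECONDITION & SPEC =====
def Spec_extract_file_links_py (event : List (String × List (List (String × String)))) (out : List String) : Prop := out = extract_file_links_py_alt event
instance (event : List (String × List (List (String × String)))) (out : List String) : Decidable (Spec_extract_file_links_py event out) := by unfold Spec_extract_file_links_py; infer_instance

-- ===== CLAIM (what is proved, stated in full; the proofs are below) =====
def Claim_equal_extract_file_links_py : Prop := ∀ (event : List (String × List (List (String × String)))), Dom_extract_file_links_py event → Spec_extract_file_links_py event (extract_file_links_py event)

-- ===== LEMMAS AND PROOFS =====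

-- dropWhile leaves a list whose head fails p
theorem dropWhile_head_false {α : Type} (p : α → Bool) (l : List α) (h : α) (t : List α)
    (he : l.dropWhile p = h :: t) : p h = false := by
  induction l with
  | nil => simp at he
  | cons a l ih =>
    by_cases hpa : p a
    · rw [List.dropWhile_cons_of_pos hpa] at he; exact ih he
    · rw [List.dropWhile_cons_of_neg hpa] at he
      cases he; simpa using hpa

-- Python's strip is idempotent (List Char level)
theorem chars_strip_idem (cs : List Char) :
    PySem.Chars.strip (PySem.Chars.strip cs) = PySem.Chars.strip cs := by
  simp only [PySem.Chars.strip, PySem.Chars.lstrip, PySem.Chars.rstrip]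
  set p := PySem.Chars.isspace
  set l1 := cs.dropWhile p with hl1
  set t := (l1.reverse.dropWhile p).reverse with ht
  -- t is a prefix of l1
  have hsuf : l1.reverse.dropWhile p <:+ l1.reverse := List.dropWhile_suffix p
  have hpre : t <+: l1 := by
    have := hsuf.reverse
    rwa [List.reverse_reverse] at this
  -- step 1: dropWhile p t = t
  have h1 : t.dropWhile p = t := by
    cases he : l1 with
    | nil =>
      rw [he] at hpre
      simp [List.prefix_nil.mp hpre]
    | cons h rest =>
      have hph : p h = false := dropWhile_head_false p cs h rest (hl1 ▸ he)
      rw [he] at hpre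
      rcases t with _ | ⟨x, t'⟩
      · simp
      · have hx : x = h := by
          rcases hpre with ⟨r, hr⟩
          simpa using congrArg (·.head?) hr
        rw [hx, List.dropWhile_cons_of_neg (by simp [hph])]
  -- step 2: dropWhile p t.reverse = t.reverse
  have h2 : t.reverse.dropWhile p = t.reverse := by
    rw [ht, List.reverse_reverse]
    exact List.dropWhile_idempotent p l1.reverse
  rw [h1, h2, List.reverse_reverse]

-- Python's strip is idempotent
theorem strip_idem (s : String) : PySem.Str.strip (PySem.Str.strip s) = PySem.Str.strip s := by
  simp only [PySem.Str.strip]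
  rw [show (String.ofList (PySem.Chars.strip s.toList)).toList = PySem.Chars.strip s.toList from by simp,
     chars_strip_idem]

-- the collection loop just appends to its accumulator
theorem extract_foldl_append (files : List (List (String × String))) (acc : List String) :
    files.foldl pyExtractStep acc = acc ++ files.foldl pyExtractStep [] := by
  induction files generalizing acc with
  | nil => simp
  | cons it rest ih =>
    simp only [List.foldl_cons]
    rw [ih (pyExtractStep acc it), ih (pyExtractStep [] it)]
    have : pyExtractStep acc it = acc ++ pyExtractStep [] it := by
      simp only [pyExtractStep]
      split <;> simp
    rw [this, List.append_assoc]

-- running A's dedupe step over one collected item = B's fused step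
theorem step_eq (st : PySem.Set String × List String) (it : List (String × String)) :
    (pyExtractStep [] it).foldl pyDedupeStep st = pyFusedStep st it := by
  simp only [pyExtractStep, pyFusedStep]
  by_cases h : PySem.Str.strip ((PySem.Dict.get? (PySem.Dict.mk it) "permalink").getD "") = ""
  · simp [h]
  · simp only [h]
    simp [pyDedupeStep, strip_idem, h]

-- fusion: running the dedupe loop over the collected links = the fused loop
theorem fuse (files : List (List (String × String))) (st : PySem.Set String × List String) :
    (files.foldl pyExtractStep []).foldl pyDedupeStep st = files.foldl pyFusedStep st := by
  induction files generalizing st with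
  | nil => rfl
  | cons it rest ih =>
    simp only [List.foldl_cons]
    rw [extract_foldl_append rest (pyExtractStep [] it), List.foldl_append, step_eq, ih]

-- ===== VERDICT (by name: the statement is the Claim_ definition above) =====
theorem extract_file_links_py_spec : Claim_equal_extract_file_links_py := by
  intro event _
  show _ = _
  simp only [extract_file_links_py, extract_file_links_py_alt, pyDedupe, fuse]
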